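-- pv_equiv track=rewrite | github.com/tainenko/Leetcode2019 | leetcode/editor/en/[2439]Minimize Maximum of Array.py | minimizeArrayValue
-- ===== SOURCE A (Python) =====
-- from typing import List
--
-- def minimizeArrayValue(nums: List[int]) -> int:
--     def check(limit):
--         remain = 0
--         for i in range(len(nums) - 1, 0, -1):
--             if nums[i] > limit:
--                 remain += nums[i] - limit
--             else:
--                 remain = max(0, remain - (limit - nums[i]))
--         return nums[0] + remain <= limit
--
--     l, r = 0, max(nums)
--     while l < r:
--         mid = l + (r - l) // 2
--         if check(mid):
--             r = mid
--         else:
--             l = mid + 1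
--     return l
-- ===== SOURCE B (Python) =====
-- def minimizeArrayValue(nums):
--     res = 0
--     s = 0
--     i = 0
--     for x in nums:
--         s += x
--         i += 1
--         res = max(res, (s + i - 1) // i)
--     return res
-- ===== Notes on version B (the rewrite author's own statement) =====
-- stated objective: faster
-- what changed: Replaced the binary search over candidate limits (each probe re-scanning the whole array backwards) by a single forward pass taking the maximum over prefixes of the ceiling of prefix_sum/(i+1), which is the exact answer the binary search converges to.
import Mathlib
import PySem

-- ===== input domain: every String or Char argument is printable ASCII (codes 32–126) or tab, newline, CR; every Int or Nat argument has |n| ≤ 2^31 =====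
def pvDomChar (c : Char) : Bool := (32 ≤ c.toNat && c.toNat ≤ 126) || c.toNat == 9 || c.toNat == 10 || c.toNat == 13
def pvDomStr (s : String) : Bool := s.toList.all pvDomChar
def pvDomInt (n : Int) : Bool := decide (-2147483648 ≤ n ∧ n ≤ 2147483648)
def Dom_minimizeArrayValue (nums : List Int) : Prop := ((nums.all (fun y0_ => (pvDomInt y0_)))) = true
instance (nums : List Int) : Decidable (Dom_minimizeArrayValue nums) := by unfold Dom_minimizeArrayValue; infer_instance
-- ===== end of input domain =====

-- B replaces A's binary search (each probe rescanning the array) by one forward pass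
-- maximizing ceil(prefix_sum/(i+1)); the return values are proved equal on nonempty lists.

-- ===== PORT A =====
-- inner helper `check(limit)` of A, transliterated (backwards index loop over range(len-1, 0, -1))
def checkA (nums : List Int) (limit : Int) : Bool :=
  decide (PySem.List.pyGetD nums 0 0 +
    (PySem.List.pyRange (((nums.length : Int)) - 1) 0 (-1)).foldl
      (fun remain i =>
        if PySem.List.pyGetD nums i 0 > limit then
          remain + (PySem.List.pyGetD nums i 0 - limit)
        else
          max 0 (remain - (limit - PySem.List.pyGetD nums i 0))) 0 ≤ limit)

-- the `while l < r` binary-search loop of A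
def loopA (nums : List Int) (l r : Int) : Int :=
  if h : l < r then
    let mid := l + PySem.Int.floordiv (r - l) 2
    if checkA nums mid then loopA nums l mid else loopA nums (mid + 1) r
  else l
termination_by (r - l).toNat
decreasing_by
  · have _h1 : 0 ≤ PySem.Int.floordiv (r - l) 2 :=
      (PySem.Int.le_floordiv_iff_mul_le (by omega)).mpr (by omega)
    have h2 : PySem.Int.floordiv (r - l) 2 < r - l :=
      (PySem.Int.floordiv_lt_iff_lt_mul (by omega)).mpr (by omega)
    omega
  · have h1 : 0 ≤ PySem.Int.floordiv (r - l) 2 :=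
      (PySem.Int.le_floordiv_iff_mul_le (by omega)).mpr (by omega)
    omega

def minimizeArrayValue (nums : List Int) : Int :=
  loopA nums 0 ((PySem.List.max? nums (fun x => x)).getD 0)

-- ===== PORT B =====
-- one forward pass: s = running prefix sum, i = its length, res = max of ceil(s/i) so far
def goB : List Int → Int → Int → Int → Int
  | [], res, _, _ => res
  | x :: t, res, s, i =>
      goB t (max res (PySem.Int.floordiv ((s + x) + (i + 1) - 1) (i + 1))) (s + x) (i + 1)

def minimizeArrayValue_alt (nums : List Int) : Int := goB nums 0 0 0

-- ===== PRECONDITION & SPEC =====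
-- Pre_ excludes only the empty list, on which A raises ValueError (max() of empty sequence).
def Pre_minimizeArrayValue (nums : List Int) : Prop := nums ≠ []
instance (nums : List Int) : Decidable (Pre_minimizeArrayValue nums) := by
  unfold Pre_minimizeArrayValue; infer_instance

def pvWitness_minimizeArrayValue : List Int := [3, 7, 1, 6]

def Spec_minimizeArrayValue (nums : List Int) (out : Int) : Prop := out = minimizeArrayValue_alt nums
instance (nums : List Int) (out : Int) : Decidable (Spec_minimizeArrayValue nums out) := by
  unfold Spec_minimizeArrayValue; infer_instance

-- ===== CLAIM (what is proved, stated in full; the proofs are below) =====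
def Claim_equal_minimizeArrayValue : Prop := ∀ (nums : List Int), Dom_minimizeArrayValue nums → Pre_minimizeArrayValue nums → Spec_minimizeArrayValue nums (minimizeArrayValue nums)

-- ===== LEMMAS AND PROOFS =====

-- the one test every candidate limit must pass: every nonempty prefix sum ≤ limit * length
def CondP (nums : List Int) (x : Int) : Prop :=
  ∀ k, k < nums.length → (nums.take (k + 1)).sum ≤ x * ((k : Int) + 1)

-- ceiling-division bracket: ceil(s/(i+1)) = (s+i) // (i+1) ≤ x ↔ s ≤ x*(i+1)
theorem ceil_le_iff (s i x : Int) (hi : 0 ≤ i) :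
    PySem.Int.floordiv (s + i) (i + 1) ≤ x ↔ s ≤ x * (i + 1) := by
  rw [show (PySem.Int.floordiv (s + i) (i + 1) ≤ x) ↔ (PySem.Int.floordiv (s + i) (i + 1) < x + 1) from by omega,
      PySem.Int.floordiv_lt_iff_lt_mul (by omega)]
  have h : (x + 1) * (i + 1) = x * (i + 1) + (i + 1) := by ring
  constructor <;> intro hh <;> linarith

-- characterisation of B's forward pass, generalized over the carried state
theorem goB_le_iff (l : List Int) : ∀ (res s i x : Int), 0 ≤ i →
    (goB l res s i ≤ x ↔
      (res ≤ x ∧ ∀ k, k < l.length → s + (l.take (k + 1)).sum ≤ x * (i + (k : Int) + 1))) := by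
  induction l with
  | nil => intro res s i x hi; simp [goB]
  | cons v t ih =>
    intro res s i x hi
    have hc : PySem.Int.floordiv ((s + v) + (i + 1) - 1) (i + 1) ≤ x ↔ s + v ≤ x * (i + 1) := by
      have := ceil_le_iff (s + v) i x hi
      rw [show (s + v) + (i + 1) - 1 = (s + v) + i from by ring]
      exact this
    rw [goB, ih _ _ _ x (by omega), max_le_iff, hc]
    constructor
    · rintro ⟨⟨hr, hv⟩, hall⟩
      refine ⟨hr, ?_⟩
      intro k hk
      cases k with
      | zero => simpa using hv
      | succ j =>
        have := hall j (by simpa using hk)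
        rw [show (i + 1 + (j : Int) + 1) = i + ((j : Int) + 1) + 1 from by ring] at this
        simpa [add_assoc, add_comm, add_left_comm] using this
    · rintro ⟨hr, hall⟩
      have hv := hall 0 (by simp)
      simp at hv
      refine ⟨⟨hr, by simpa using hv⟩, ?_⟩
      intro j hj
      have := hall (j + 1) (by simpa using hj)
      rw [show ((j:Nat) + 1 + 1) = j + 2 from by ring, List.take_succ_cons] at this
      push_cast at this
      rw [show (i + ((j : Int) + 1) + 1) = i + 1 + (j : Int) + 1 from by ring] at this
      simpa [add_assoc, add_comm, add_left_comm] using this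

theorem alt_le_iff (nums : List Int) (x : Int) :
    minimizeArrayValue_alt nums ≤ x ↔ (0 ≤ x ∧ CondP nums x) := by
  rw [minimizeArrayValue_alt, goB_le_iff nums 0 0 0 x le_rfl]
  simp only [zero_add, CondP]

-- the backwards remain-loop of check, as a foldr over the tail
def Rfb (limit : Int) (t : List Int) : Int :=
  t.foldr (fun v r => if v > limit then r + (v - limit) else max 0 (r - (limit - v))) 0

theorem Rf_nonneg (limit : Int) (t : List Int) : 0 ≤ Rfb limit t := by
  induction t with
  | nil => simp [Rfb]
  | cons v t ih => simp only [Rfb, List.foldr_cons] at *; split <;> omega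

theorem Rf_cons (limit v : Int) (t : List Int) :
    Rfb limit (v :: t) = max 0 (Rfb limit t + v - limit) := by
  have h := Rf_nonneg limit t
  simp only [Rfb, List.foldr_cons] at *
  split <;> omega

theorem add_Rf_le_iff (t : List Int) : ∀ (a limit : Int),
    (a + Rfb limit t ≤ limit ↔ ∀ k, k ≤ t.length → a + (t.take k).sum ≤ limit * ((k : Int) + 1)) := by
  induction t with
  | nil =>
    intro a limit
    constructor
    · intro h k hk
      have hk0 : k = 0 := by simpa using hk
      subst hk0
      simpa [Rfb] using h
    · intro h
      simpa [Rfb] using h 0 (by simp)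
  | cons v t ih =>
    intro a limit
    rw [Rf_cons]
    have hsplit : a + max 0 (Rfb limit t + v - limit) ≤ limit ↔
        (a ≤ limit ∧ (a + v - limit) + Rfb limit t ≤ limit) := by omega
    rw [hsplit, ih (a + v - limit) limit]
    constructor
    · rintro ⟨h0, hall⟩ k hk
      cases k with
      | zero => simpa using h0
      | succ j =>
        have := hall j (by simpa using hk)
        have e : limit * ((j : Int) + 1 + 1) = limit * ((j : Int) + 1) + limit := by ring
        push_cast
        rw [List.take_succ_cons]
        push_cast at this ⊢
        rw [e]
        simp only [List.sum_cons]
        linarith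
    · intro hall
      refine ⟨by simpa using hall 0 (by omega), ?_⟩
      intro j hj
      have := hall (j + 1) (by simpa using hj)
      rw [List.take_succ_cons] at this
      push_cast at this
      have e : limit * ((j : Int) + 1 + 1) = limit * ((j : Int) + 1) + limit := by ring
      rw [e] at this
      simp only [List.sum_cons] at this
      linarith

-- reading xs[1+k] through the index-range foldr equals folding over the tail directly
theorem idxFoldr (F : Int → Int → Int) :
    ∀ (t : List Int) (a : Int) (get : Nat → Int), (∀ k, k < t.length → get k = t.getD k 0) →
      (List.range t.length).foldr (fun k r => F r (get k)) a = t.foldr (fun v r => F r v) a := by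
  intro t
  induction t with
  | nil => intro a get h; simp
  | cons v t ih =>
    intro a get h
    rw [List.length_cons, List.range_succ_eq_map, List.foldr_cons, List.foldr_map]
    rw [ih a (fun k => get (k + 1)) (fun k hk => by simpa using h (k + 1) (by simpa using hk))]
    rw [h 0 (by simp)]
    simp

theorem checkA_fold (h : Int) (t : List Int) (limit : Int) :
    checkA (h :: t) limit = decide (h + Rfb limit t ≤ limit) := by
  have e1 : (((h :: t).length : Int)) - 1 = (t.length : Int) := by
    simp [List.length_cons]
  rw [checkA, e1, PySem.List.pyRange_neg_one_eq_reverse, List.foldl_reverse,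
      PySem.List.pyRange_one]
  have e2 : (((t.length : Int) + 1) - (0 + 1)).toNat = t.length := by omega
  rw [e2, List.foldr_map]
  have e3 := idxFoldr
    (fun r v => if v > limit then r + (v - limit) else max 0 (r - (limit - v)))
    t 0 (fun k => PySem.List.pyGetD (h :: t) (0 + 1 + (k : Int)) 0)
    (fun k hk => by
      have : (0 + 1 + (k : Int)) = ((k + 1 : Nat) : Int) := by push_cast; ring
      simp only []
      rw [this, PySem.List.pyGetD_natCast]
      simp)
  rw [e3]
  simp [Rfb, PySem.List.pyGetD_zero_cons]

theorem checkA_iff (h : Int) (t : List Int) (limit : Int) :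
    checkA (h :: t) limit = true ↔ CondP (h :: t) limit := by
  rw [checkA_fold, decide_eq_true_iff, add_Rf_le_iff]
  constructor
  · intro H k hk
    rw [List.take_succ_cons, List.sum_cons]
    exact H k (Nat.lt_succ_iff.mp (by simpa using hk))
  · intro H k hk
    have := H k (by simpa [Nat.lt_succ_iff] using hk)
    rw [List.take_succ_cons, List.sum_cons] at this
    exact this

theorem checkA_iff_le (h : Int) (t : List Int) (mid : Int) (hm : 0 ≤ mid) :
    (checkA (h :: t) mid = true ↔ minimizeArrayValue_alt (h :: t) ≤ mid) := by
  rw [checkA_iff, alt_le_iff]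
  exact ⟨fun hc => ⟨hm, hc⟩, fun hc => hc.2⟩

theorem loopA_eq (h : Int) (t : List Int) :
    ∀ (n : Nat) (l r : Int), (r - l).toNat = n → 0 ≤ l →
      l ≤ minimizeArrayValue_alt (h :: t) → minimizeArrayValue_alt (h :: t) ≤ r →
      loopA (h :: t) l r = minimizeArrayValue_alt (h :: t) := by
  intro n
  induction n using Nat.strong_induction_on with
  | _ n ih =>
    intro l r hn hl hlB hBr
    rw [loopA]
    by_cases hlr : l < r
    · rw [dif_pos hlr]
      have h1 : 0 ≤ PySem.Int.floordiv (r - l) 2 :=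
        (PySem.Int.le_floordiv_iff_mul_le (by omega)).mpr (by omega)
      have h2 : PySem.Int.floordiv (r - l) 2 < r - l :=
        (PySem.Int.floordiv_lt_iff_lt_mul (by omega)).mpr (by omega)
      set fd := PySem.Int.floordiv (r - l) 2 with hfd
      by_cases hc : minimizeArrayValue_alt (h :: t) ≤ l + fd
      · rw [if_pos ((checkA_iff_le h t _ (by omega)).mpr hc)]
        exact ih (l + fd - l).toNat (by omega) l (l + fd) (by omega) hl hlB hc
      · rw [if_neg (fun hh => hc ((checkA_iff_le h t _ (by omega)).mp hh))]
        exact ih (r - (l + fd + 1)).toNat (by omega) (l + fd + 1) r (by omega) (by omega)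
          (by omega) hBr
    · rw [dif_neg hlr]; omega

-- every prefix sum is at most its length times an upper bound m of the elements
theorem prefix_sum_le (nums : List Int) (m : Int) (hmax : ∀ y ∈ nums, y ≤ m)
    (k : Nat) (hk : k < nums.length) :
    (nums.take (k + 1)).sum ≤ ((k : Int) + 1) * m := by
  have hlen : ((nums.take (k + 1)).length) = k + 1 := by
    rw [List.length_take]; omega
  have hle : (nums.take (k + 1)).sum ≤ (nums.take (k + 1)).length • m :=
    List.sum_le_card_nsmul _ m (fun x hx => hmax x (List.mem_of_mem_take hx))
  rw [hlen] at hle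
  calc (nums.take (k + 1)).sum ≤ (k + 1) • m := hle
    _ = ((k : Int) + 1) * m := by push_cast [nsmul_eq_mul]; ring

-- ===== VERDICT (by name: the statement is the Claim_ definition above) =====
theorem minimizeArrayValue_spec : Claim_equal_minimizeArrayValue := by
  intro nums _ hpre
  unfold Spec_minimizeArrayValue
  obtain ⟨h, t, rfl⟩ : ∃ h t, nums = h :: t := by
    cases nums with
    | nil => exact absurd rfl hpre
    | cons h t => exact ⟨_, _, rfl⟩
  rw [minimizeArrayValue]
  obtain ⟨m, hm⟩ : ∃ m, PySem.List.max? (h :: t) (fun x => x) = some m := by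
    cases hq : PySem.List.max? (h :: t) (fun x => x) with
    | none => exact absurd ((PySem.List.max?_eq_none_iff _ _).mp hq) (by simp)
    | some m => exact ⟨_, rfl⟩
  have hmax : ∀ y ∈ (h :: t), y ≤ m := by
    intro y hy
    simpa using PySem.List.max?_isMax hm y hy
  rw [hm, Option.getD_some]
  have hB0 : 0 ≤ minimizeArrayValue_alt (h :: t) :=
    ((alt_le_iff (h :: t) _).mp le_rfl).1
  by_cases hm0 : 0 ≤ m
  · have hBm : minimizeArrayValue_alt (h :: t) ≤ m := by
      rw [alt_le_iff]
      refine ⟨hm0, fun k hk => ?_⟩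
      calc ((h :: t).take (k + 1)).sum ≤ ((k : Int) + 1) * m := prefix_sum_le _ m hmax k hk
        _ = m * ((k : Int) + 1) := by ring
    exact loopA_eq h t (m - 0).toNat 0 m (by omega) le_rfl hB0 hBm
  · push Not at hm0
    rw [loopA, dif_neg (by omega)]
    have hB1 : minimizeArrayValue_alt (h :: t) ≤ 0 := by
      rw [alt_le_iff]
      refine ⟨le_rfl, fun k hk => ?_⟩
      have h1 := prefix_sum_le _ m hmax k hk
      have h2 : ((k : Int) + 1) * m ≤ 0 :=
        mul_nonpos_of_nonneg_of_nonpos (by positivity) (le_of_lt hm0)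
      simp only [zero_mul]
      linarith
    omega
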